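-- pv_equiv track=rewrite | github.com/Shiddieqy/simple-sudoku-solver | 3x3/3x3.py | isDone
-- ===== SOURCE A (Python) =====
-- def isDone(Arr):
--     m=0
--     for i in range (3):
--         for j in range (3):
--             for k in range (j+1,3):
--                 if Arr[i][k]==Arr[i][j] or Arr[k][i]==Arr[j][i]:
--                     m=1
--                     return False
--     if m == 0 :
--         return True
-- ===== SOURCE B (Python) =====
-- def isDone(Arr):
--     for i in range(3):
--         row = {Arr[i][0], Arr[i][1], Arr[i][2]}
--         col = {Arr[0][i], Arr[1][i], Arr[2][i]}
--         if len(row) < 3 or len(col) < 3: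
--             return False
--     return True
-- ===== Notes on version B (the rewrite author's own statement) =====
-- stated objective: idiomatic
-- what changed: Replaces the triple-nested pairwise comparison loop with building a set of each row's and column's first three entries and checking its cardinality is 3.
-- outside the precondition, e.g. on isDone([[4, 5], [4, 5, 35], [2, 2, 2], [2], [-905, 1, 77]]): A returns False, B raises IndexError
import Mathlib
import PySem

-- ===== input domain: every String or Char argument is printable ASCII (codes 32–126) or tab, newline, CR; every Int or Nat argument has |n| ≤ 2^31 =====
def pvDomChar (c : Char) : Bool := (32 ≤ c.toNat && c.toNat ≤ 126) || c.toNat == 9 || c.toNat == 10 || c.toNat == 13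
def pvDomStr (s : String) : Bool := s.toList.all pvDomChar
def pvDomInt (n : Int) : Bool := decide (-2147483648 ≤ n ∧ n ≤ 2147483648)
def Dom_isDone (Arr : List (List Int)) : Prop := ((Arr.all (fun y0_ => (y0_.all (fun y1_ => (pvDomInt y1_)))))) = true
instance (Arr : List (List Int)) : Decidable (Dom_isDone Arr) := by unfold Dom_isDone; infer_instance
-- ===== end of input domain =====

-- B replaces A's triple-nested pairwise comparison loop with per-row/column sets checked for cardinality 3 (idiomatic, same cost).


-- ===== PORT A =====
-- Arr[i][j] (in-range under Pre_isDone)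
def pvGet (Arr : List (List Int)) (i j : Int) : Int :=
  PySem.List.pyGetD (PySem.List.pyGetD Arr i []) j 0

-- triple nested loop with early 'return False'; falls through to 'return True'
def isDone (Arr : List (List Int)) : Bool :=
  if (PySem.List.pyRange 0 3 1).any (fun i =>
       (PySem.List.pyRange 0 3 1).any (fun j =>
         (PySem.List.pyRange (j+1) 3 1).any (fun k =>
           pvGet Arr i k == pvGet Arr i j || pvGet Arr k i == pvGet Arr j i)))
  then false else true

-- ===== PORT B =====
def isDone_alt (Arr : List (List Int)) : Bool :=
  (PySem.List.pyRange 0 3 1).all (fun i =>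
    !(decide ((PySem.Set.ofList [pvGet Arr i 0, pvGet Arr i 1, pvGet Arr i 2]).length < 3)
      || decide ((PySem.Set.ofList [pvGet Arr 0 i, pvGet Arr 1 i, pvGet Arr 2 i]).length < 3)))

-- ===== PRECONDITION & SPEC =====
-- Pre_ excludes malformed boards (fewer than 3 rows, or a short row among the first three), on which indexing raises IndexError;
-- A's early return can still yield False there before it reaches the out-of-range index, while B's up-front indexing raises.
def Pre_isDone (Arr : List (List Int)) : Prop :=
  3 ≤ Arr.length ∧ ∀ r ∈ Arr.take 3, 3 ≤ r.length
instance (Arr : List (List Int)) : Decidable (Pre_isDone Arr) := by unfold Pre_isDone; infer_instance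
def pvWitness_isDone : List (List Int) := [[1,2,3],[4,5,6],[7,8,9]]
def Spec_isDone (Arr : List (List Int)) (out : Bool) : Prop := out = isDone_alt Arr
instance (Arr : List (List Int)) (out : Bool) : Decidable (Spec_isDone Arr out) := by unfold Spec_isDone; infer_instance

-- ===== CLAIM (what is proved, stated in full; the proofs are below) =====
def Claim_equal_isDone : Prop := ∀ (Arr : List (List Int)), Dom_isDone Arr → Pre_isDone Arr → Spec_isDone Arr (isDone Arr)

-- ===== LEMMAS AND PROOFS =====
theorem pyGetD_one_cons {α : Type} (x y : α) (t : List α) (d : α) :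
    PySem.List.pyGetD (x::y::t) 1 d = y := by
  simp [PySem.List.pyGetD_ofNat']
theorem pyGetD_two_cons {α : Type} (x y z : α) (t : List α) (d : α) :
    PySem.List.pyGetD (x::y::z::t) 2 d = z := by
  simp [PySem.List.pyGetD_ofNat']
theorem if_bool_not (b : Bool) : (if b then false else true) = !b := by
  cases b <;> simp
theorem set3_len (x y z : Int) :
    decide ((PySem.Set.ofList [x, y, z]).length < 3) = ((y == x) || (z == x) || (z == y)) := by
  by_cases h1 : y = x <;> by_cases h2 : z = x <;> by_cases h3 : z = y <;>
    simp [PySem.Set.ofList, PySem.Set.add, PySem.Set.contains, h1, h2, h3]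

-- ===== VERDICT (by name: the statement is the Claim_ definition above) =====
theorem isDone_spec : Claim_equal_isDone := by
  intro Arr _ hpre
  obtain ⟨hlen, hrows⟩ := hpre
  match Arr, hlen with
  | a :: b :: c :: rest, _ =>
    have ha : 3 ≤ a.length := hrows a (by simp)
    have hb : 3 ≤ b.length := hrows b (by simp)
    have hc : 3 ≤ c.length := hrows c (by simp)
    match a, ha, b, hb, c, hc with
    | a0 :: a1 :: a2 :: _, _, b0 :: b1 :: b2 :: _, _, c0 :: c1 :: c2 :: _, _ =>
      show isDone _ = isDone_alt _
      have r0 : PySem.List.pyRange 0 3 1 = [0,1,2] := by decide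
      have r1 : PySem.List.pyRange (0+1) 3 1 = [1,2] := by decide
      have r2 : PySem.List.pyRange (1+1) 3 1 = [2] := by decide
      have r3 : PySem.List.pyRange (2+1) 3 1 = [] := by decide
      simp only [isDone, isDone_alt, pvGet, r0, r1, r2, r3, List.any_cons, List.any_nil,
        List.all_cons, List.all_nil, PySem.List.pyGetD_zero_cons]
      simp only [pyGetD_one_cons, pyGetD_two_cons]
      simp only [set3_len, if_bool_not, Bool.not_or]
      ac_rfl
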